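-- pv_equiv track=rewrite | github.com/damian022/lab1 | 3mitm.py | generar_combinaciones
-- ===== SOURCE A (Python) =====
-- def generar_combinaciones(mensaje):
--     """
--     Genera todas las combinaciones posibles de un mensaje dado, asumiendo que puede haber un desplazamiento
--     desconocido en el texto original.
--     """
--     # Desplazamientos posibles (de 0 a 25 para las letras)
--     combinaciones = []
--     for desplazamiento in range(26):
--         combinacion = ''.join(
--             chr(((ord(c) - ord('a') + desplazamiento) % 26) + ord('a')) if c.islower() else
--             chr(((ord(c) - ord('A') + desplazamiento) % 26) + ord('A')) if c.isupper() else c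
--             for c in mensaje
--         )
--         combinaciones.append(combinacion)
--     return combinaciones
-- ===== SOURCE B (Python) =====
-- def _sig(c):
--     # successor letter with wraparound; non-letters unchanged
--     if c == 'z':
--         return 'a'
--     if c == 'Z':
--         return 'A'
--     if 'a' <= c < 'z' or 'A' <= c < 'Z':
--         return chr(ord(c) + 1)
--     return c
--
--
-- def generar_combinaciones(mensaje):
--     # Incremental chain: each variant is the previous one rotated by ONE letter,
--     # so variant k = message shifted by k without ever recomputing from the original.
--     combinaciones = []
--     actual = mensaje
--     for _ in range(26):
--         combinaciones.append(actual)
--         actual = ''.join(_sig(c) for c in actual)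
--     return combinaciones
-- ===== Notes on version B (the rewrite author's own statement) =====
-- stated objective: alternative
-- what changed: Instead of recomputing each shift from the original with per-character modular arithmetic, B builds an incremental chain: variant k is the previous variant rotated by one letter (successor with 'z'->'a'/'Z'->'A' wraparound), starting from the message itself.
import Mathlib
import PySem

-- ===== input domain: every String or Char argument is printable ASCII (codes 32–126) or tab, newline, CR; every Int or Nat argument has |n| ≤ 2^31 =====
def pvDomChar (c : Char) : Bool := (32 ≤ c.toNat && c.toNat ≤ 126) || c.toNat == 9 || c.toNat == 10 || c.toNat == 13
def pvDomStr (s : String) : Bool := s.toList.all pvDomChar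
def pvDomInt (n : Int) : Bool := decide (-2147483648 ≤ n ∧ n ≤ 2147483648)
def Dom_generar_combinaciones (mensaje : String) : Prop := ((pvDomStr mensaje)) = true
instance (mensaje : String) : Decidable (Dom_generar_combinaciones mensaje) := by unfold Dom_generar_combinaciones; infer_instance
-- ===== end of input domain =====

-- B replaces the per-shift modular-arithmetic recomputation by an incremental chain:
-- each variant is the previous variant rotated by one letter (alternative decomposition, same cost).


-- ===== PORT A =====
-- c.islower()/c.isupper() are ported as the ASCII letter ranges: exact on the
-- stated printable-ASCII domain.
def pvShiftA (d : Int) (c : Char) : Char :=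
  if 'a' ≤ c ∧ c ≤ 'z' then
    Char.ofNat (PySem.Int.mod ((c.toNat : Int) - 97 + d) 26 + 97).toNat
  else if 'A' ≤ c ∧ c ≤ 'Z' then
    Char.ofNat (PySem.Int.mod ((c.toNat : Int) - 65 + d) 26 + 65).toNat
  else c

def generar_combinaciones (mensaje : String) : List String :=
  (PySem.List.pyRange 0 26 1).foldl
    (fun acc d => acc ++ [String.ofList (mensaje.toList.map (pvShiftA d))]) []

-- ===== PORT B =====
-- _sig: successor letter with wraparound; non-letters unchanged
def pvSig (c : Char) : Char :=
  if c = 'z' then 'a'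
  else if c = 'Z' then 'A'
  else if ('a' ≤ c ∧ c < 'z') ∨ ('A' ≤ c ∧ c < 'Z') then Char.ofNat (c.toNat + 1)
  else c

def generar_combinaciones_alt (mensaje : String) : List String :=
  ((PySem.List.pyRange 0 26 1).foldl
    (fun st _ => (st.1 ++ [st.2], String.ofList (st.2.toList.map pvSig)))
    (([] : List String), mensaje)).1

-- ===== PRECONDITION & SPEC =====
def Spec_generar_combinaciones (mensaje : String) (out : List String) : Prop := out = generar_combinaciones_alt mensaje
instance (mensaje : String) (out : List String) : Decidable (Spec_generar_combinaciones mensaje out) := by unfold Spec_generar_combinaciones; infer_instance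

-- ===== CLAIM (what is proved, stated in full; the proofs are below) =====
def Claim_equal_generar_combinaciones : Prop := ∀ (mensaje : String), Dom_generar_combinaciones mensaje → Spec_generar_combinaciones mensaje (generar_combinaciones mensaje)

-- ===== LEMMAS AND PROOFS =====

-- A's append-accumulator loop over the shifts is a map over the shifts
theorem pv_foldl_append_map {α β : Type} (f : α → β) (l : List α) (acc : List β) :
    l.foldl (fun a d => a ++ [f d]) acc = acc ++ l.map f := by
  induction l generalizing acc with
  | nil => simp
  | cons x xs ih => simp [List.foldl, ih]

-- B's chain loop ignores the loop variable: it is an iteration recorded step by step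
theorem pv_foldl_chain {α β : Type} (g : α → α) (l : List β) (acc : List α) (s : α) :
    (l.foldl (fun st (_ : β) => (st.1 ++ [st.2], g st.2)) (acc, s)).1
      = acc ++ (List.range l.length).map (fun k => g^[k] s) := by
  induction l generalizing acc s with
  | nil => simp
  | cons x xs ih =>
    simp only [List.foldl, ih, List.length_cons, List.range_succ_eq_map,
      List.map_cons, List.map_map]
    simp [Function.iterate_succ_apply, Function.comp_def]

-- per-character agreement: shifting by d equals d successor steps,
-- checked over all 26 shifts and all 127 ASCII codes
set_option maxRecDepth 100000 in
set_option maxHeartbeats 4000000 in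
theorem pv_char_check :
    ((List.range 26).all (fun d => (List.range 127).all (fun n =>
      pvShiftA (d : Int) (Char.ofNat n) == pvSig^[d] (Char.ofNat n)))) = true := by
  decide

theorem pv_char_eq (k : Nat) (hk : k < 26) (c : Char) (hc : pvDomChar c = true) :
    pvShiftA (k : Int) c = pvSig^[k] c := by
  have hlt : c.toNat < 127 := by
    simp only [pvDomChar, Bool.or_eq_true, Bool.and_eq_true, decide_eq_true_eq, beq_iff_eq] at hc
    omega
  have h := pv_char_check
  rw [List.all_eq_true] at h
  have h2 := h k (List.mem_range.mpr hk)
  rw [List.all_eq_true] at h2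
  have h3 := h2 c.toNat (List.mem_range.mpr hlt)
  rw [beq_iff_eq, Char.ofNat_toNat] at h3
  exact h3

-- iterating B's string step is mapping the iterated character step
theorem pv_iter_step (k : Nat) (s : String) :
    (fun t => String.ofList (t.toList.map pvSig))^[k] s
      = String.ofList (s.toList.map (pvSig^[k])) := by
  induction k with
  | zero => simp
  | succ n ih =>
    rw [Function.iterate_succ_apply', ih]
    have h : ∀ x, pvSig (pvSig^[n] x) = pvSig^[n + 1] x :=
      fun x => (Function.iterate_succ_apply' pvSig n x).symm
    simp [List.map_map, Function.comp_def, h]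

-- ===== VERDICT (by name: the statement is the Claim_ definition above) =====
theorem generar_combinaciones_spec : Claim_equal_generar_combinaciones := by
  intro mensaje hm
  unfold Spec_generar_combinaciones generar_combinaciones generar_combinaciones_alt
  rw [pv_foldl_append_map,
    pv_foldl_chain (fun t => String.ofList (t.toList.map pvSig)) (PySem.List.pyRange 0 26 1) [] mensaje]
  have hlen : (PySem.List.pyRange 0 26 1).length = 26 := by decide
  have hr : PySem.List.pyRange 0 26 1 = List.map Int.ofNat (List.range 26) := by decide
  rw [hlen, hr, List.map_map]
  simp only [List.nil_append, Function.comp_def]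
  apply List.map_congr_left
  intro k hk
  rw [pv_iter_step]
  congr 1
  apply List.map_congr_left
  intro c hc
  exact pv_char_eq k (List.mem_range.mp hk) c
    (List.all_eq_true.mp hm c hc)
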